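-- pv_equiv track=rewrite | github.com/egeturkuler/marmaray-station-times | stops.py | get_arrival_times
-- ===== SOURCE A (Python) =====
-- stops = [
--     'Gebze', 'Darıca', 'Osmangazi', 'Fatih', 'Çayırova', 'Tuzla', 'İçmeler',
--     'Aydıntepe', 'Güzelyalı', 'Tersane', 'Kaynarca', 'Pendik', 'Yunus',
--     'Kartal', 'Başak', 'Atalar', 'Cevizli', 'Maltepe', 'Süreyya Plajı',
--     'İdealtepe', 'Küçükyalı', 'Bostancı', 'Suadiye', 'Erenköy', 'Göztepe',
--     'Feneryolu', 'Söğütlü Ç', 'Ayrılık Ç', 'Üsküdar', 'Sirkeci', 'Yenikapı',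
--     'Kazlıçeşme', 'Zeytinburnu', 'Yenimahalle', 'Bakırköy', 'Ataköy', 'Yeşilyurt',
--     'Yeşilköy', 'Akvaryum', 'Florya', 'Küçük çekmece', 'Mustafa Kemal', 'Halkalı'
-- ]
--
-- first_train_departures = [
--     ['06:05', '06:07', '06:09', '06:11', '06:13', '06:03', '06:06', '06:08', '06:10', '06:12', '06:14', '06:02', '06:05', '06:08', '06:10', '06:12', '06:14', '06:02', '06:04', '06:06', '06:08', '06:11', '06:13', '06:00', '06:02', '06:04', '06:00', '06:10', '05:59'],
--     ['06:03', '06:06', '06:10', '06:12', '06:02', '06:04', '06:06', '06:09', '06:11', '06:14', '06:16', '06:19', '06:22'],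
--     ['06:20', '06:22', '06:24', '06:26', '06:28', '06:18', '06:21', '06:23', '06:25', '06:27', '06:29', '06:09', '06:12', '06:13', '06:15', '06:17', '06:19', '06:09', '06:11', '06:13', '06:12', '06:15', '06:12', '06:07', '06:10', '06:12', '06:07', '06:15', '06:07', '06:11', '06:15', '06:18', '06:20', '06:08', '06:10', '06:21', '06:24', '06:26', '06:29', '06:31', '06:34', '06:37'],
--     ['22:50', '22:52', '22:54', '22:56', '22:58', '23:02', '23:05', '23:07', '23:09', '23:11', '23:13', '23:16', '23:19', '23:22', '23:24', '23:26', '23:28', '23:31', '23:33', '23:35', '23:37', '23:40', '23:42', '23:45', '23:47', '23:49', '23:52', '23:55', '23:59', '00:03', '00:06', '00:10', '00:12', '00:15', '00:17', '00:19', '00:22', '00:24', '00:27', '00:29', '00:32', '00:35']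
-- ]
--
-- last_train_departures = [
--     '22:50', '22:52', '22:54', '22:56', '22:58', '23:02', '23:05', '23:07',
--     '23:09', '23:11', '23:13', '23:16', '23:19', '23:22', '23:24', '23:26',
--     '23:28', '23:31', '23:33', '23:35', '23:37', '23:40', '23:42', '23:45',
--     '23:47', '23:49', '23:52', '23:55', '23:59', '00:03', '00:06', '00:10',
--     '00:12', '00:15', '00:17', '00:19', '00:22', '00:24', '00:27', '00:29',
--     '00:32', '00:35'
-- ]
--
-- def get_arrival_times(station_index):
--     arrival_times = []
--     # Find the positions of Ataköy and Pendik
--     atakoy_index = stops.index('Ataköy')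
--     pendik_index = stops.index('Pendik')
--     for j, train_schedule in enumerate(first_train_departures):
--         if station_index < len(train_schedule):
--             current_time = train_schedule[station_index]
--             last_time = last_train_departures[station_index]
--             while current_time <= last_time:
--                 arrival_times.append(current_time)
--                 hour, minute = map(int, current_time.split(':'))
--                 # Check if the station is between Ataköy and Pendik
--                 if atakoy_index <= station_index <= pendik_index or pendik_index <= station_index <= atakoy_index:
--                     minute += 8  # Time between trains is 8 minutes between Ataköy and Pendik
--                 else:
--                     minute += 15  # Time between trains is 15 minutes between Halkalı and Gebze
--                 if minute >= 60:
--                     hour += 1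
--                     minute -= 60
--                 current_time = f"{hour:02d}:{minute:02d}"
--                 # Break the loop if the current time exceeds the last scheduled departure time
--                 if current_time > last_time:
--                     break
--     return arrival_times
-- ===== SOURCE B (Python) =====
-- # Re-implementation: all schedule data converted once to total minutes (the tables below
-- # are the module's first_train_departures / last_train_departures rendered as hour*60+minute,
-- # with no wrap at 24h); each schedule then yields its trains in closed form instead of
-- # stepping minute strings one train at a time.
--
-- # first_train_departures in total minutes (same 4 schedules, same order)
-- FIRST_MIN = [
--     [365, 367, 369, 371, 373, 363, 366, 368, 370, 372, 374, 362, 365, 368, 370, 372, 374, 362, 364, 366, 368, 371, 373, 360, 362, 364, 360, 370, 359],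
--     [363, 366, 370, 372, 362, 364, 366, 369, 371, 374, 376, 379, 382],
--     [380, 382, 384, 386, 388, 378, 381, 383, 385, 387, 389, 369, 372, 373, 375, 377, 379, 369, 371, 373, 372, 375, 372, 367, 370, 372, 367, 375, 367, 371, 375, 378, 380, 368, 370, 381, 384, 386, 389, 391, 394, 397],
--     [1370, 1372, 1374, 1376, 1378, 1382, 1385, 1387, 1389, 1391, 1393, 1396, 1399, 1402, 1404, 1406, 1408, 1411, 1413, 1415, 1417, 1420, 1422, 1425, 1427, 1429, 1432, 1435, 1439, 3, 6, 10, 12, 15, 17, 19, 22, 24, 27, 29, 32, 35],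
-- ]
--
-- # last_train_departures in total minutes
-- LAST_MIN = [1370, 1372, 1374, 1376, 1378, 1382, 1385, 1387, 1389, 1391, 1393,
--             1396, 1399, 1402, 1404, 1406, 1408, 1411, 1413, 1415, 1417, 1420,
--             1422, 1425, 1427, 1429, 1432, 1435, 1439, 3, 6, 10, 12, 15, 17,
--             19, 22, 24, 27, 29, 32, 35]
--
-- PENDIK_INDEX = 11   # stops.index('Pendik')
-- ATAKOY_INDEX = 35   # stops.index('Ataköy')
--
--
-- def _fmt(t):
--     return f"{t // 60:02d}:{t % 60:02d}"
--
--
-- def _run(start, last, step):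
--     if start > last:
--         return []
--     return [_fmt(start + k * step) for k in range((last - start) // step + 1)]
--
--
-- def get_arrival_times(station_index):
--     step = 8 if PENDIK_INDEX <= station_index <= ATAKOY_INDEX else 15
--     return [t for starts in FIRST_MIN if station_index < len(starts)
--             for t in _run(starts[station_index], LAST_MIN[station_index], step)]
-- ===== Notes on version B (the rewrite author's own statement) =====
-- stated objective: simpler
-- what changed: All schedule data is converted once into integer total-minute tables (hour*60+minute, no 24h wrap) and each schedule emits its trains in closed form — count = (last-start)//step + 1 and a range comprehension formatting start+k*step — replacing A's per-train while loop that parses the time string, adds the step, carries the hour, re-formats and string-compares every iteration.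
-- outside the precondition, e.g. on get_arrival_times(-14): A raises IndexError, B raises IndexError
import Mathlib
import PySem

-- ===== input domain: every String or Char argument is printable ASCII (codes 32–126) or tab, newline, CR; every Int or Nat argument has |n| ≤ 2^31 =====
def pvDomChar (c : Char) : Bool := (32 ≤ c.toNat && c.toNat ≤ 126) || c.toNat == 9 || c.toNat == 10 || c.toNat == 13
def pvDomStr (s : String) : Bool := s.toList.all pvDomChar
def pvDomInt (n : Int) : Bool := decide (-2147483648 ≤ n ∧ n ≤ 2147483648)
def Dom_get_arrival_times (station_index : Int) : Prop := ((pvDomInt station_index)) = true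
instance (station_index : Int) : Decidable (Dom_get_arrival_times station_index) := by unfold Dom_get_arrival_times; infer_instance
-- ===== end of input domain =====

-- B converts all schedule data to total minutes once (numeric tables) and emits each
-- schedule's trains in closed form via a range comprehension, instead of A's minute-by-
-- minute string stepping with parse/format/compare per train (objective: simpler).

-- ===== PORT A =====
-- module-level tables of stops.py used by A
def stopsTable : List String := [
  "Gebze", "Darıca", "Osmangazi", "Fatih", "Çayırova", "Tuzla", "İçmeler",
  "Aydıntepe", "Güzelyalı", "Tersane", "Kaynarca", "Pendik", "Yunus",
  "Kartal", "Başak", "Atalar", "Cevizli", "Maltepe", "Süreyya Plajı",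
  "İdealtepe", "Küçükyalı", "Bostancı", "Suadiye", "Erenköy", "Göztepe",
  "Feneryolu", "Söğütlü Ç", "Ayrılık Ç", "Üsküdar", "Sirkeci", "Yenikapı",
  "Kazlıçeşme", "Zeytinburnu", "Yenimahalle", "Bakırköy", "Ataköy", "Yeşilyurt",
  "Yeşilköy", "Akvaryum", "Florya", "Küçük çekmece", "Mustafa Kemal", "Halkalı"]

def firstTrainDepartures : List (List String) := [
  ["06:05", "06:07", "06:09", "06:11", "06:13", "06:03", "06:06", "06:08", "06:10", "06:12", "06:14", "06:02", "06:05", "06:08", "06:10", "06:12", "06:14", "06:02", "06:04", "06:06", "06:08", "06:11", "06:13", "06:00", "06:02", "06:04", "06:00", "06:10", "05:59"],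
  ["06:03", "06:06", "06:10", "06:12", "06:02", "06:04", "06:06", "06:09", "06:11", "06:14", "06:16", "06:19", "06:22"],
  ["06:20", "06:22", "06:24", "06:26", "06:28", "06:18", "06:21", "06:23", "06:25", "06:27", "06:29", "06:09", "06:12", "06:13", "06:15", "06:17", "06:19", "06:09", "06:11", "06:13", "06:12", "06:15", "06:12", "06:07", "06:10", "06:12", "06:07", "06:15", "06:07", "06:11", "06:15", "06:18", "06:20", "06:08", "06:10", "06:21", "06:24", "06:26", "06:29", "06:31", "06:34", "06:37"],
  ["22:50", "22:52", "22:54", "22:56", "22:58", "23:02", "23:05", "23:07", "23:09", "23:11", "23:13", "23:16", "23:19", "23:22", "23:24", "23:26", "23:28", "23:31", "23:33", "23:35", "23:37", "23:40", "23:42", "23:45", "23:47", "23:49", "23:52", "23:55", "23:59", "00:03", "00:06", "00:10", "00:12", "00:15", "00:17", "00:19", "00:22", "00:24", "00:27", "00:29", "00:32", "00:35"]]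

def lastTrainDepartures : List String := [
  "22:50", "22:52", "22:54", "22:56", "22:58", "23:02", "23:05", "23:07",
  "23:09", "23:11", "23:13", "23:16", "23:19", "23:22", "23:24", "23:26",
  "23:28", "23:31", "23:33", "23:35", "23:37", "23:40", "23:42", "23:45",
  "23:47", "23:49", "23:52", "23:55", "23:59", "00:03", "00:06", "00:10",
  "00:12", "00:15", "00:17", "00:19", "00:22", "00:24", "00:27", "00:29",
  "00:32", "00:35"]

-- strings are handled on the List Char side (PySem.Chars), exact for Python str here;
-- 'hour, minute = map(int, current_time.split(":"))'
def aParseHM (cs : List Char) : Int × Int :=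
  let parts := (PySem.Chars.split? cs [':']).getD []
  ((PySem.Int.ofChars? (parts.getD 0 [])).getD 0, (PySem.Int.ofChars? (parts.getD 1 [])).getD 0)

-- f"{n:02d}" — exact for 0 ≤ n (the only values reached by A)
def aFmt2 (n : Int) : List Char :=
  if 0 ≤ n ∧ n < 10 then '0' :: PySem.Int.toChars n else PySem.Int.toChars n

-- A's while loop; the fuel only makes the recursion total, it is never exhausted on the
-- admitted inputs (at most ~180 iterations are possible); Python's str '<='/'>' is
-- code-point lexicographic = Lean's order on List Char
def aLoop (station_index atak pend : Int) (last : List Char) : Nat → List Char → List String → List String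
  | 0, _, acc => acc
  | fuel + 1, current, acc =>
    if ¬ (last < current) then      -- current_time <= last_time
      let acc := acc ++ [String.ofList current]
      let hm := aParseHM current
      let minute := hm.2 + (if (atak ≤ station_index ∧ station_index ≤ pend) ∨
                              (pend ≤ station_index ∧ station_index ≤ atak) then 8 else 15)
      let hour := if 60 ≤ minute then hm.1 + 1 else hm.1
      let minute := if 60 ≤ minute then minute - 60 else minute
      let current := aFmt2 hour ++ ':' :: aFmt2 minute    -- f"{hour:02d}:{minute:02d}"
      if last < current then acc    -- current_time > last_time → break
      else aLoop station_index atak pend last fuel current acc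
    else acc

def get_arrival_times (station_index : Int) : List String :=
  let atak : Int := ((PySem.List.index? stopsTable "Ataköy").getD 0 : Nat)
  let pend : Int := ((PySem.List.index? stopsTable "Pendik").getD 0 : Nat)
  firstTrainDepartures.foldl (fun acc schedule =>
    if station_index < (schedule.length : Int) then
      aLoop station_index atak pend
        ((PySem.List.pyGet? lastTrainDepartures station_index).getD "").toList 200
        ((PySem.List.pyGet? schedule station_index).getD "").toList acc   -- IndexError excluded by Pre_
    else acc) []

-- ===== PORT B =====
-- Source B's module-level constant tables: the same departure times rendered as total
-- minutes hour*60+minute (no wrap at 24h)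
def firstMinTable : List (List Int) := [
  [365, 367, 369, 371, 373, 363, 366, 368, 370, 372, 374, 362, 365, 368, 370, 372, 374, 362, 364, 366, 368, 371, 373, 360, 362, 364, 360, 370, 359],
  [363, 366, 370, 372, 362, 364, 366, 369, 371, 374, 376, 379, 382],
  [380, 382, 384, 386, 388, 378, 381, 383, 385, 387, 389, 369, 372, 373, 375, 377, 379, 369, 371, 373, 372, 375, 372, 367, 370, 372, 367, 375, 367, 371, 375, 378, 380, 368, 370, 381, 384, 386, 389, 391, 394, 397],
  [1370, 1372, 1374, 1376, 1378, 1382, 1385, 1387, 1389, 1391, 1393, 1396, 1399, 1402, 1404, 1406, 1408, 1411, 1413, 1415, 1417, 1420, 1422, 1425, 1427, 1429, 1432, 1435, 1439, 3, 6, 10, 12, 15, 17, 19, 22, 24, 27, 29, 32, 35]]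

def lastMinTable : List Int := [1370, 1372, 1374, 1376, 1378, 1382, 1385, 1387, 1389, 1391, 1393,
  1396, 1399, 1402, 1404, 1406, 1408, 1411, 1413, 1415, 1417, 1420,
  1422, 1425, 1427, 1429, 1432, 1435, 1439, 3, 6, 10, 12, 15, 17,
  19, 22, 24, 27, 29, 32, 35]

-- f"{t:02d}" piece of _fmt — exact for 0 ≤ t
def bPad2 (n : Int) : List Char :=
  if 0 ≤ n ∧ n < 10 then '0' :: PySem.Int.toChars n else PySem.Int.toChars n

-- _fmt: f"{t // 60:02d}:{t % 60:02d}"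
def bFmt (t : Int) : String :=
  String.ofList (bPad2 (PySem.Int.floordiv t 60) ++ ':' :: bPad2 (PySem.Int.mod t 60))

-- _run: the closed-form list of arrivals of one schedule
def bRun (start last step : Int) : List String :=
  if start > last then []
  else (PySem.List.pyRange 0 (PySem.Int.floordiv (last - start) step + 1) 1).map
    (fun k => bFmt (start + k * step))

def get_arrival_times_alt (station_index : Int) : List String :=
  let step : Int := if 11 ≤ station_index ∧ station_index ≤ 35 then 8 else 15
  firstMinTable.flatMap (fun starts =>
    if station_index < (starts.length : Int) then
      bRun ((PySem.List.pyGet? starts station_index).getD 0)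
           ((PySem.List.pyGet? lastMinTable station_index).getD 0) step
    else [])

-- ===== PRECONDITION & SPEC =====
-- Pre_ excludes station_index ≤ -14, where A raises IndexError (negative indexing past the
-- start of the 13-entry second schedule); A returns normally on every station_index ≥ -13.
def Pre_get_arrival_times (station_index : Int) : Prop := -13 ≤ station_index
instance (station_index : Int) : Decidable (Pre_get_arrival_times station_index) := by unfold Pre_get_arrival_times; infer_instance
def pvWitness_get_arrival_times : Int := 0

def Spec_get_arrival_times (station_index : Int) (out : List String) : Prop := out = get_arrival_times_alt station_index
instance (station_index : Int) (out : List String) : Decidable (Spec_get_arrival_times station_index out) := by unfold Spec_get_arrival_times; infer_instance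

-- ===== CLAIM (what is proved, stated in full; the proofs are below) =====
def Claim_equal_get_arrival_times : Prop := ∀ (station_index : Int), Dom_get_arrival_times station_index → Pre_get_arrival_times station_index → Spec_get_arrival_times station_index (get_arrival_times station_index)

-- ===== LEMMAS AND PROOFS =====

-- proof-side abbreviations: "HH:MM" → minutes, the step width, the train count, the rendering
def bMinutes (s : String) : Int :=
  let p := (PySem.Chars.split? s.toList [':']).getD []
  (PySem.Int.ofChars? (p.getD 0 [])).getD 0 * 60 + (PySem.Int.ofChars? (p.getD 1 [])).getD 0

def stepOf (n : Int) : Int := if 11 ≤ n ∧ n ≤ 35 then 8 else 15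
def cnt (n t L : Int) : Int := if t ≤ L then PySem.Int.floordiv (L - t) (stepOf n) + 1 else 0
def fmtC (t : Int) : List Char := bPad2 (PySem.Int.floordiv t 60) ++ ':' :: bPad2 (PySem.Int.mod t 60)
def dg (d : Nat) : Char := Char.ofNat (48 + d)

theorem step_cases (n : Int) : stepOf n = 8 ∨ stepOf n = 15 := by unfold stepOf; split_ifs <;> simp

theorem step_sel (n : Int) :
    (if (35 ≤ n ∧ n ≤ 11) ∨ (11 ≤ n ∧ n ≤ 35) then (8:Int) else 15) = stepOf n := by
  unfold stepOf; split_ifs <;> omega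

theorem pad_shape : ∀ a : Nat, a < 100 → bPad2 (a : Int) = [dg (a/10), dg (a%10)] := by decide
theorem dg_lt_iff : ∀ i : Nat, i < 10 → ∀ j : Nat, j < 10 → (dg i < dg j ↔ i < j) := by decide
theorem dg_eq_iff : ∀ i : Nat, i < 10 → ∀ j : Nat, j < 10 → (dg i = dg j ↔ i = j) := by decide
theorem dg_ne_colon : ∀ i : Nat, i < 10 → dg i ≠ ':' := by decide
theorem ofChars_pad : ∀ a : Nat, a < 100 → PySem.Int.ofChars? (bPad2 (a : Int)) = some (a : Int) := by decide

theorem split_shape (a1 a2 b1 b2 : Char) (h1 : a1 ≠ ':') (h2 : a2 ≠ ':') (h3 : b1 ≠ ':') (h4 : b2 ≠ ':') :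
    PySem.Chars.split? [a1, a2, ':', b1, b2] [':'] = some [[a1, a2], [b1, b2]] := by
  simp [PySem.Chars.split?, PySem.Chars.splitOn, PySem.Chars.splitOn.go, List.isPrefixOf,
        Ne.symm h1, Ne.symm h2, Ne.symm h3, Ne.symm h4]

theorem fmt_decomp (t : Int) (h0 : 0 ≤ t) (h1 : t < 6000) :
    fmtC t = [dg (t.toNat/60/10), dg (t.toNat/60%10), ':', dg (t.toNat%60/10), dg (t.toNat%60%10)] := by
  have ht : ((t.toNat : Nat) : Int) = t := Int.toNat_of_nonneg h0
  have hdiv : PySem.Int.floordiv t 60 = ((t.toNat/60 : Nat) : Int) := by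
    rw [← ht]; exact_mod_cast PySem.Int.floordiv_natCast t.toNat 60
  have hmod : PySem.Int.mod t 60 = ((t.toNat%60 : Nat) : Int) := by
    rw [← ht]; exact_mod_cast PySem.Int.mod_natCast t.toNat 60
  unfold fmtC
  rw [hdiv, hmod, pad_shape _ (by omega), pad_shape _ (by omega)]
  rfl

theorem fmt_lt_iff (t s : Int) (ht0 : 0 ≤ t) (ht1 : t < 6000) (hs0 : 0 ≤ s) (hs1 : s < 6000) :
    (fmtC t < fmtC s) ↔ t < s := by
  rw [fmt_decomp t ht0 ht1, fmt_decomp s hs0 hs1]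
  have hcol : ¬ (':' < ':') := by decide
  have l1 := dg_lt_iff (t.toNat/60/10) (by omega) (s.toNat/60/10) (by omega)
  have l2 := dg_lt_iff (t.toNat/60%10) (by omega) (s.toNat/60%10) (by omega)
  have l3 := dg_lt_iff (t.toNat%60/10) (by omega) (s.toNat%60/10) (by omega)
  have l4 := dg_lt_iff (t.toNat%60%10) (by omega) (s.toNat%60%10) (by omega)
  have e1 := dg_eq_iff (t.toNat/60/10) (by omega) (s.toNat/60/10) (by omega)
  have e2 := dg_eq_iff (t.toNat/60%10) (by omega) (s.toNat/60%10) (by omega)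
  have e3 := dg_eq_iff (t.toNat%60/10) (by omega) (s.toNat%60/10) (by omega)
  have e4 := dg_eq_iff (t.toNat%60%10) (by omega) (s.toNat%60%10) (by omega)
  simp only [List.cons_lt_cons_iff, List.not_lt_nil, hcol, l1, l2, l3, l4, e1, e2, e3, e4,
    false_or, and_false, or_false, true_and]
  omega

theorem fmt_parse (t : Int) (h0 : 0 ≤ t) (h1 : t < 6000) :
    aParseHM (fmtC t) = (PySem.Int.floordiv t 60, PySem.Int.mod t 60) := by
  have ht : ((t.toNat : Nat) : Int) = t := Int.toNat_of_nonneg h0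
  have hdiv : PySem.Int.floordiv t 60 = ((t.toNat/60 : Nat) : Int) := by
    rw [← ht]; exact_mod_cast PySem.Int.floordiv_natCast t.toNat 60
  have hmod : PySem.Int.mod t 60 = ((t.toNat%60 : Nat) : Int) := by
    rw [← ht]; exact_mod_cast PySem.Int.mod_natCast t.toNat 60
  rw [fmt_decomp t h0 h1]
  unfold aParseHM
  rw [split_shape _ _ _ _ (dg_ne_colon _ (by omega)) (dg_ne_colon _ (by omega))
        (dg_ne_colon _ (by omega)) (dg_ne_colon _ (by omega))]
  simp only [Option.getD_some, List.getD, List.getElem?_cons_zero, List.getElem?_cons_succ]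
  rw [show [dg (t.toNat/60/10), dg (t.toNat/60%10)] = bPad2 ((t.toNat/60 : Nat) : Int) from
        (pad_shape _ (by omega)).symm,
      show [dg (t.toNat%60/10), dg (t.toNat%60%10)] = bPad2 ((t.toNat%60 : Nat) : Int) from
        (pad_shape _ (by omega)).symm,
      ofChars_pad _ (by omega), ofChars_pad _ (by omega)]
  rw [hdiv, hmod]
  rfl

theorem loop_eq (n L : Int) (hL0 : 0 ≤ L) (hL1 : L < 1440) :
    ∀ (fuel : Nat) (t : Int) (acc : List String), 0 ≤ t → t < 1500 → (cnt n t L).toNat ≤ fuel →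
    aLoop n 35 11 (fmtC L) fuel (fmtC t) acc
      = acc ++ (PySem.List.pyRange 0 (cnt n t L) 1).map
          (fun k => String.ofList (fmtC (t + k * stepOf n))) := by
  have hstep : 0 < stepOf n ∧ stepOf n < 60 := by rcases step_cases n with h | h <;> rw [h] <;> omega
  have hfd : ∀ a : Int, PySem.Int.floordiv a (stepOf n) = a / stepOf n :=
    fun a => PySem.Int.floordiv_eq_ediv_of_pos hstep.1
  intro fuel
  induction fuel with
  | zero =>
    intro t acc ht0 ht1 hfu
    have hLt : L < t := by
      by_contra hc
      have hc2 : t ≤ L := by omega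
      have h1 : cnt n t L = (L - t) / stepOf n + 1 := by unfold cnt; rw [if_pos hc2, hfd]
      have h2 : 0 ≤ (L - t) / stepOf n := Int.ediv_nonneg (by omega) (by omega)
      omega
    have hcnt : cnt n t L = 0 := by unfold cnt; rw [if_neg (by omega)]
    simp [aLoop, hcnt, PySem.List.pyRange_one_eq_nil (by omega : (0:Int) ≤ 0)]
  | succ fuel ih =>
    intro t acc ht0 ht1 hfu
    by_cases hTL : t ≤ L
    · have hc : ¬ (fmtC L < fmtC t) := by rw [fmt_lt_iff L t (by omega) (by omega) ht0 (by omega)]; omega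
      rw [aLoop, if_pos hc]
      simp only [fmt_parse t ht0 (by omega), step_sel]
      have hEd : PySem.Int.floordiv t 60 = t / 60 := PySem.Int.floordiv_eq_ediv_of_pos (by omega)
      have hEm : PySem.Int.mod t 60 = t % 60 := PySem.Int.mod_eq_emod_of_pos (by omega)
      have hnext :
          (aFmt2 (if 60 ≤ (PySem.Int.mod t 60) + stepOf n then (PySem.Int.floordiv t 60) + 1 else PySem.Int.floordiv t 60) ++
            ':' :: aFmt2 (if 60 ≤ (PySem.Int.mod t 60) + stepOf n
              then (PySem.Int.mod t 60) + stepOf n - 60 else (PySem.Int.mod t 60) + stepOf n))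
          = fmtC (t + stepOf n) := by
        show (bPad2 _ ++ ':' :: bPad2 _) = _
        unfold fmtC
        rw [hEd, hEm, PySem.Int.floordiv_eq_ediv_of_pos (by omega : (0:Int) < 60),
            PySem.Int.mod_eq_emod_of_pos (by omega : (0:Int) < 60)]
        have h1 : (if 60 ≤ t % 60 + stepOf n then t / 60 + 1 else t / 60) = (t + stepOf n) / 60 := by
          split_ifs <;> omega
        have h2 : (if 60 ≤ t % 60 + stepOf n then t % 60 + stepOf n - 60 else t % 60 + stepOf n)
            = (t + stepOf n) % 60 := by split_ifs <;> omega
        rw [h1, h2]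
      rw [hnext]
      by_cases hTL2 : t + stepOf n ≤ L
      · rw [if_neg (by rw [fmt_lt_iff L (t + stepOf n) (by omega) (by omega) (by omega) (by omega)]; omega)]
        have hcc : cnt n t L = cnt n (t + stepOf n) L + 1 := by
          unfold cnt
          rw [if_pos hTL, if_pos hTL2, hfd, hfd]
          have heq : (L - t) / stepOf n = (L - (t + stepOf n)) / stepOf n + 1 := by
            have h' : L - t = L - (t + stepOf n) + 1 * stepOf n := by ring
            rw [h', Int.add_mul_ediv_right _ _ (by omega : stepOf n ≠ 0)]
          omega
        have hnn : 0 ≤ cnt n (t + stepOf n) L := by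
          unfold cnt
          rw [if_pos hTL2, hfd]
          have := Int.ediv_nonneg (by omega : (0:Int) ≤ L - (t + stepOf n)) (by omega : (0:Int) ≤ stepOf n)
          omega
        rw [ih (t + stepOf n) (acc ++ [String.ofList (fmtC t)]) (by omega) (by omega) (by omega)]
        rw [List.append_assoc]
        congr 1
        rw [hcc, PySem.List.pyRange_one_cons (by omega : (0:Int) < cnt n (t + stepOf n) L + 1)]
        simp only [List.map_cons, zero_mul, add_zero, List.singleton_append]
        congr 1
        rw [PySem.List.pyRange_one, PySem.List.pyRange_one]
        have hlen : (cnt n (t + stepOf n) L + 1 - (0 + 1)).toNat = (cnt n (t + stepOf n) L - 0).toNat := by omega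
        rw [hlen, List.map_map, List.map_map]
        apply List.map_congr_left
        intro k _
        simp only [Function.comp_apply]
        congr 1
        ring_nf
      · rw [if_pos (by rw [fmt_lt_iff L (t + stepOf n) (by omega) (by omega) (by omega) (by omega)]; omega)]
        have hcnt : cnt n t L = 1 := by
          unfold cnt
          rw [if_pos hTL, hfd, Int.ediv_eq_zero_of_lt (by omega) (by omega)]
          norm_num
        have hr : PySem.List.pyRange 0 (1:Int) 1 = [0] := by decide
        rw [hcnt, hr]
        simp
    · rw [aLoop, if_neg (by
        simp only [not_not]
        rw [fmt_lt_iff L t hL0 (by omega) ht0 (by omega)]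
        omega)]
      have hcnt : cnt n t L = 0 := by unfold cnt; rw [if_neg hTL]
      simp [hcnt, PySem.List.pyRange_one_eq_nil (by omega : (0:Int) ≤ 0)]

-- the per-schedule branch, written with the proof-side abbreviations
def branchR (n : Int) (sched : List String) (acc : List String) : List String :=
  if n < (sched.length : Int) then
    acc ++ (PySem.List.pyRange 0
        (cnt n (bMinutes ((PySem.List.pyGet? sched n).getD ""))
               (bMinutes ((PySem.List.pyGet? lastTrainDepartures n).getD ""))) 1).map
      (fun k => String.ofList (fmtC (bMinutes ((PySem.List.pyGet? sched n).getD "") + k * stepOf n)))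
  else acc

theorem last_inv : ∀ s ∈ lastTrainDepartures,
    s.toList = fmtC (bMinutes s) ∧ 0 ≤ bMinutes s ∧ bMinutes s < 1440 := by decide

theorem last_len : lastTrainDepartures.length = 42 := by decide

theorem pyGet?_some {α : Type} (xs : List α) (n : Int) (h1 : -(xs.length : Int) ≤ n)
    (h2 : n < (xs.length : Int)) : ∃ v, PySem.List.pyGet? xs n = some v ∧ v ∈ xs := by
  cases h : PySem.List.pyGet? xs n with
  | none =>
    rw [PySem.List.pyGet?_eq_none_iff] at h
    exact absurd (by unfold PySem.Raise.InRange; omega) h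
  | some v => exact ⟨v, rfl, PySem.List.mem_of_pyGet?_eq_some _ h⟩

theorem branchA_eq (n : Int) (hn : -13 ≤ n) (sched : List String)
    (hs13 : 13 ≤ sched.length) (hs42 : sched.length ≤ 42)
    (hinv : ∀ s ∈ sched, s.toList = fmtC (bMinutes s) ∧ 0 ≤ bMinutes s ∧ bMinutes s < 1440)
    (acc : List String) :
    (if n < (sched.length : Int) then
      aLoop n 35 11 ((PySem.List.pyGet? lastTrainDepartures n).getD "").toList 200
        ((PySem.List.pyGet? sched n).getD "").toList acc
    else acc) = branchR n sched acc := by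
  unfold branchR
  split_ifs with h
  · obtain ⟨s0, hg, hm⟩ := pyGet?_some sched n (by omega) h
    obtain ⟨l0, hgl, hml⟩ := pyGet?_some lastTrainDepartures n
      (by rw [last_len]; omega) (by rw [last_len]; omega)
    obtain ⟨hf, ht0, ht1⟩ := hinv s0 hm
    obtain ⟨hfl, hl0, hl1⟩ := last_inv l0 hml
    rw [hg, hgl]
    simp only [Option.getD_some]
    rw [hf, hfl]
    have hfuel : (cnt n (bMinutes s0) (bMinutes l0)).toNat ≤ 200 := by
      rcases step_cases n with hs | hs <;>
        (unfold cnt; rw [hs, PySem.Int.floordiv_eq_ediv_of_pos (by omega)]; split_ifs <;> omega)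
    exact loop_eq n (bMinutes l0) hl0 hl1 200 (bMinutes s0) acc ht0 (by omega) hfuel
  · rfl

theorem sched_inv0 : ∀ s ∈ firstTrainDepartures.getD 0 [],
    s.toList = fmtC (bMinutes s) ∧ 0 ≤ bMinutes s ∧ bMinutes s < 1440 := by decide
theorem sched_inv1 : ∀ s ∈ firstTrainDepartures.getD 1 [],
    s.toList = fmtC (bMinutes s) ∧ 0 ≤ bMinutes s ∧ bMinutes s < 1440 := by decide
theorem sched_inv2 : ∀ s ∈ firstTrainDepartures.getD 2 [],
    s.toList = fmtC (bMinutes s) ∧ 0 ≤ bMinutes s ∧ bMinutes s < 1440 := by decide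
theorem sched_inv3 : ∀ s ∈ firstTrainDepartures.getD 3 [],
    s.toList = fmtC (bMinutes s) ∧ 0 ≤ bMinutes s ∧ bMinutes s < 1440 := by decide

theorem idx_atakoy : (((PySem.List.index? stopsTable "Ataköy").getD 0 : Nat) : Int) = 35 := by decide
theorem idx_pendik : (((PySem.List.index? stopsTable "Pendik").getD 0 : Nat) : Int) = 11 := by decide

theorem A_eq (n : Int) (hn : -13 ≤ n) :
    get_arrival_times n
      = branchR n (firstTrainDepartures.getD 3 [])
          (branchR n (firstTrainDepartures.getD 2 [])
            (branchR n (firstTrainDepartures.getD 1 [])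
              (branchR n (firstTrainDepartures.getD 0 []) []))) := by
  unfold get_arrival_times
  rw [show firstTrainDepartures =
        [firstTrainDepartures.getD 0 [], firstTrainDepartures.getD 1 [],
         firstTrainDepartures.getD 2 [], firstTrainDepartures.getD 3 []] from rfl]
  simp only [List.foldl_cons, List.foldl_nil, idx_atakoy, idx_pendik]
  rw [branchA_eq n hn _ (by decide) (by decide) sched_inv0,
      branchA_eq n hn _ (by decide) (by decide) sched_inv1,
      branchA_eq n hn _ (by decide) (by decide) sched_inv2,
      branchA_eq n hn _ (by decide) (by decide) sched_inv3]
  rfl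

-- B-side: the numeric tables ARE the string tables read through bMinutes
theorem minTable_eq : firstMinTable =
    [(firstTrainDepartures.getD 0 []).map bMinutes, (firstTrainDepartures.getD 1 []).map bMinutes,
     (firstTrainDepartures.getD 2 []).map bMinutes, (firstTrainDepartures.getD 3 []).map bMinutes] := by
  decide

theorem lastMin_eq : lastMinTable = lastTrainDepartures.map bMinutes := by decide

theorem pyGet?_map {α β : Type} (f : α → β) (xs : List α) (n : Int) :
    PySem.List.pyGet? (xs.map f) n = (PySem.List.pyGet? xs n).map f := by
  simp [PySem.List.pyGet?, PySem.List.pyIdx?]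

theorem branchB_eq (n : Int) (hn : -13 ≤ n) (sched : List String)
    (hs13 : 13 ≤ sched.length) (hs42 : sched.length ≤ 42)
    (acc : List String) :
    acc ++ (if n < ((sched.map bMinutes).length : Int) then
        bRun ((PySem.List.pyGet? (sched.map bMinutes) n).getD 0)
             ((PySem.List.pyGet? (lastTrainDepartures.map bMinutes) n).getD 0) (stepOf n)
      else []) = branchR n sched acc := by
  unfold branchR
  rw [List.length_map, pyGet?_map, pyGet?_map]
  split_ifs with h
  · obtain ⟨s0, hg, _⟩ := pyGet?_some sched n (by omega) h
    obtain ⟨l0, hgl, _⟩ := pyGet?_some lastTrainDepartures n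
      (by rw [last_len]; omega) (by rw [last_len]; omega)
    rw [hg, hgl]
    simp only [Option.map_some, Option.getD_some]
    congr 1
    unfold bRun cnt
    by_cases hle : bMinutes s0 ≤ bMinutes l0
    · rw [if_neg (by omega), if_pos hle]
      rfl
    · rw [if_pos (by omega), if_neg hle]
      rw [PySem.List.pyRange_one_eq_nil (by omega : (0:Int) ≤ 0), List.map_nil]
  · simp

theorem B_eq (n : Int) (hn : -13 ≤ n) :
    get_arrival_times_alt n
      = branchR n (firstTrainDepartures.getD 3 [])
          (branchR n (firstTrainDepartures.getD 2 [])
            (branchR n (firstTrainDepartures.getD 1 [])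
              (branchR n (firstTrainDepartures.getD 0 []) []))) := by
  unfold get_arrival_times_alt
  simp only [minTable_eq, lastMin_eq, List.flatMap_cons, List.flatMap_nil, List.append_nil]
  rw [show (if 11 ≤ n ∧ n ≤ 35 then (8:Int) else 15) = stepOf n from rfl]
  rw [← branchB_eq n hn (firstTrainDepartures.getD 0 []) (by decide) (by decide) [],
      ← branchB_eq n hn (firstTrainDepartures.getD 1 []) (by decide) (by decide) _,
      ← branchB_eq n hn (firstTrainDepartures.getD 2 []) (by decide) (by decide) _,
      ← branchB_eq n hn (firstTrainDepartures.getD 3 []) (by decide) (by decide) _]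
  simp [List.append_assoc]

-- ===== VERDICT (by name: the statement is the Claim_ definition above) =====
theorem get_arrival_times_spec : Claim_equal_get_arrival_times := by
  intro n _hdom hpre
  unfold Spec_get_arrival_times
  unfold Pre_get_arrival_times at hpre
  rw [A_eq n hpre, B_eq n hpre]
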